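-- pv_equiv track=rewrite | github.com/TimmyTheRenaissanceMan/morse-code-translator | main.py | identify_separator
-- ===== SOURCE A (Python) =====
-- def identify_separator(sample):
--     separator = ""
--     is_on = True
--     for i in sample:
--         if is_on:
--             if i != "." and i != "-":
--                 separator = separator + i
--             else:
--                 if separator != "":
--                     return separator
-- ===== SOURCE B (Python) =====
-- def identify_separator(sample):
--     # build alternating runs of symbol/non-symbol characters, then scan them
--     groups = []
--     i, n = 0, len(sample)
--     while i < n:
--         k = sample[i] in ".-"
--         j = i
--         while j < n and (sample[j] in ".-") == k:
--             j += 1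
--         groups.append((k, sample[i:j]))
--         i = j
--     for idx, (k, run) in enumerate(groups):
--         if not k and idx + 1 < len(groups):
--             return run
--     return None
-- ===== Notes on version B (the rewrite author's own statement) =====
-- stated objective: alternative
-- what changed: Replaces A's flag-driven accumulate-until-symbol loop with a two-phase decomposition: first split the input into alternating runs of symbol/non-symbol characters (a groupby), then scan the run list and return the first non-symbol run that is followed by another run.
import Mathlib
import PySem

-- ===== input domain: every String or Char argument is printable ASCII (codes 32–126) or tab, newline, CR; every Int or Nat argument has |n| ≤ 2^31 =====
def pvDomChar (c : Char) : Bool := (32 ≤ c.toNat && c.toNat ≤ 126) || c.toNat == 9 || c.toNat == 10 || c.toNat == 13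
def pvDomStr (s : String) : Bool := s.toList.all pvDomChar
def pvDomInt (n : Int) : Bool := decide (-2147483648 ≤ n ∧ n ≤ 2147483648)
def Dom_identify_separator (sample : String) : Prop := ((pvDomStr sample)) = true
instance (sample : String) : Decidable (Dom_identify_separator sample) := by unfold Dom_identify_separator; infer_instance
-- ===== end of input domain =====

-- B replaces A's flag-driven accumulate-until-symbol loop by a split-into-runs-then-scan decomposition (same cost).

-- ===== PORT A =====
-- A's loop, step for step: accumulate non-symbol chars into `sep`; on the first
-- symbol seen with a nonempty `sep`, return it; fall off the end -> none.
def pvGoA : List Char → List Char → Option String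
  | [], _ => none
  | c :: rest, sep =>
    if c != '.' && c != '-' then pvGoA rest (sep ++ [c])
    else if sep ≠ [] then some (String.mk sep) else pvGoA rest sep

def identify_separator (sample : String) : Option String := pvGoA sample.toList []

-- ===== PORT B =====
def pvKey (c : Char) : Bool := c == '.' || c == '-'

-- Source B's first phase: split into maximal runs of equal key (the inner while-loop
-- is the takeWhile/dropWhile span on the tail).
def pvGrp : List Char → List (Bool × List Char)
  | [] => []
  | c :: rest =>
    (pvKey c, c :: rest.takeWhile (fun d => pvKey d == pvKey c)) ::
      pvGrp (rest.dropWhile (fun d => pvKey d == pvKey c))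
termination_by l => l.length
decreasing_by
  exact Nat.lt_succ_of_le (List.length_dropWhile_le _ _)

-- Source B's second phase: first non-symbol run followed by another run.
def pvScan : List (Bool × List Char) → Option String
  | [] => none
  | (k, cs) :: gs => if k = false ∧ gs ≠ [] then some (String.mk cs) else pvScan gs

def identify_separator_alt (sample : String) : Option String := pvScan (pvGrp sample.toList)

-- ===== PRECONDITION & SPEC =====
def Spec_identify_separator (sample : String) (out : Option String) : Prop := out = identify_separator_alt sample
instance (sample : String) (out : Option String) : Decidable (Spec_identify_separator sample out) := by unfold Spec_identify_separator; infer_instance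

-- ===== CLAIM (what is proved, stated in full; the proofs are below) =====
def Claim_equal_identify_separator : Prop := ∀ (sample : String), Dom_identify_separator sample → Spec_identify_separator sample (identify_separator sample)

-- ===== LEMMAS AND PROOFS =====

-- common characterisation: drop leading symbols, take the non-symbol run,
-- return it iff something follows it
def pvSpec (cs : List Char) : Option String :=
  let cs' := cs.dropWhile pvKey
  if cs'.dropWhile (fun d => !pvKey d) = [] then none
  else some (String.mk (cs'.takeWhile (fun d => !pvKey d)))

theorem pvCond_eq (c : Char) : (c != '.' && c != '-') = !pvKey c := by
  simp [pvKey, bne]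

theorem pvGrp_eq_nil {l : List Char} : pvGrp l = [] ↔ l = [] := by
  cases l <;> simp [pvGrp]

theorem pvDropWhile_idem (p : Char → Bool) (l : List Char) :
    (l.dropWhile p).dropWhile p = l.dropWhile p := by
  induction l with
  | nil => simp
  | cons c rest ih =>
    by_cases h : p c = true
    · simpa [List.dropWhile, h] using ih
    · simp [List.dropWhile, h]

theorem pvGoA_ne (cs : List Char) : ∀ sep : List Char, sep ≠ [] →
    pvGoA cs sep =
      if cs.dropWhile (fun d => !pvKey d) = [] then none
      else some (String.mk (sep ++ cs.takeWhile (fun d => !pvKey d))) := by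
  induction cs with
  | nil => intro sep h; simp [pvGoA]
  | cons c rest ih =>
    intro sep h
    by_cases hk : pvKey c = true
    · simp [pvGoA, pvCond_eq, hk, h, List.dropWhile, List.takeWhile]
    · have hk' : pvKey c = false := by simpa using hk
      have : sep ++ [c] ≠ [] := by simp
      simp [pvGoA, pvCond_eq, hk', List.dropWhile, List.takeWhile, ih (sep ++ [c]) this]

theorem pvGoA_spec (cs : List Char) : pvGoA cs [] = pvSpec cs := by
  induction cs with
  | nil => simp [pvGoA, pvSpec]
  | cons c rest ih =>
    by_cases hk : pvKey c = true
    · simpa [pvGoA, pvCond_eq, hk, pvSpec, List.dropWhile] using ih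
    · have hk' : pvKey c = false := by simpa using hk
      have h1 : pvGoA (c :: rest) [] = pvGoA rest [c] := by
        simp [pvGoA, pvCond_eq, hk']
      rw [h1, pvGoA_ne rest [c] (by simp)]
      simp [pvSpec, List.dropWhile, hk']

theorem pvScan_grp (cs : List Char) : pvScan (pvGrp cs) = pvSpec cs := by
  induction cs using pvGrp.induct with
  | case1 => simp [pvGrp, pvScan, pvSpec]
  | case2 c rest ih =>
    by_cases hk : pvKey c = true
    · have hpred : (fun d => pvKey d == pvKey c) = pvKey := by
        funext d; simp [hk]
      rw [pvGrp]
      rw [hpred] at ih ⊢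
      simp only [pvScan, hk]
      rw [if_neg (by simp), ih]
      simp [pvSpec, List.dropWhile, hk, pvDropWhile_idem]
    · have hk' : pvKey c = false := by simpa using hk
      have hpred : (fun d => pvKey d == pvKey c) = (fun d => !pvKey d) := by
        funext d; simp [hk']
      rw [pvGrp, hpred]
      by_cases hr : rest.dropWhile (fun d => !pvKey d) = []
      · simp [pvScan, hr, pvGrp, pvSpec, List.dropWhile, hk']
      · have hne : pvGrp (rest.dropWhile fun d => !pvKey d) ≠ [] := by
          simpa [pvGrp_eq_nil] using hr
        simp [pvScan, hk', hne, pvSpec, List.dropWhile, hr]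

-- ===== VERDICT (by name: the statement is the Claim_ definition above) =====
theorem identify_separator_spec : Claim_equal_identify_separator := by
  intro sample _
  unfold Spec_identify_separator identify_separator identify_separator_alt
  rw [pvGoA_spec, pvScan_grp]
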